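-- pv_equiv track=rewrite | github.com/pueblak/wordle-autosolver | common.py | _get_master_response
-- ===== SOURCE A (Python) =====
-- RIGHT = 'O'
--
-- CLOSE = '+'
--
-- WRONG = '.'
--
-- def _get_master_response(guess, answer):
--     if guess == answer:
--         return ''.join([RIGHT for _ in answer])
--     response = ''
--     # get frequency count of each letter in the answer
--     letter_count = dict()
--     for letter in answer:
--         if letter in letter_count:
--             letter_count[letter] += 1
--         else:
--             letter_count[letter] = 1
--     # first loop counts exact matches
--     for index in range(len(answer)):
--         letter = guess[index]
--         if letter == answer[index]:
--             response += RIGHT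
--             letter_count[letter] -= 1
--     # second loop counts non-exact matches
--     for index in range(len(answer)):
--         letter = guess[index]
--         if letter != answer[index]:
--             if letter in letter_count:
--                 if letter_count[letter] > 0:
--                     response += CLOSE
--                     letter_count[letter] -= 1
--     # third loop counts misses
--     while len(response) < len(answer):
--         response += WRONG
--     return response
-- ===== SOURCE B (Python) =====
-- RIGHT = 'O'
--
-- CLOSE = '+'
--
-- WRONG = '.'
--
--
-- def _get_master_response(guess, answer):
--     # Pair up guessed letter vs answer letter position by position (IndexError preserved
--     # when the guess is shorter than the answer, as in the original).
--     pairs = [(guess[index], answer[index]) for index in range(len(answer))]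
--     misses = [pair for pair in pairs if pair[0] != pair[1]]
--     num_right = len(pairs) - len(misses)
--     # Close letters are the multiset intersection of the non-exact guess letters with the
--     # non-exact answer letters: sum over distinct letters of min of the two counts.
--     mis_guess = [g for g, _ in misses]
--     mis_answer = [a for _, a in misses]
--     num_close = sum(min(mis_guess.count(c), mis_answer.count(c)) for c in set(mis_guess))
--     return RIGHT * num_right + CLOSE * num_close + WRONG * (len(misses) - num_close)
-- ===== Notes on version B (the rewrite author's own statement) =====
-- stated objective: alternative
-- what changed: B drops A's mutable letter-count dict, the greedy decrementing second pass and the while-loop padding: it zips guess with answer, counts exact matches as pairs minus mismatched pairs, and computes the close count in closed form as the multiset-intersection size sum(min(count of c among mismatched guess letters, count of c among mismatched answer letters) for distinct c), then emits the string by replication.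
import Mathlib
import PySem

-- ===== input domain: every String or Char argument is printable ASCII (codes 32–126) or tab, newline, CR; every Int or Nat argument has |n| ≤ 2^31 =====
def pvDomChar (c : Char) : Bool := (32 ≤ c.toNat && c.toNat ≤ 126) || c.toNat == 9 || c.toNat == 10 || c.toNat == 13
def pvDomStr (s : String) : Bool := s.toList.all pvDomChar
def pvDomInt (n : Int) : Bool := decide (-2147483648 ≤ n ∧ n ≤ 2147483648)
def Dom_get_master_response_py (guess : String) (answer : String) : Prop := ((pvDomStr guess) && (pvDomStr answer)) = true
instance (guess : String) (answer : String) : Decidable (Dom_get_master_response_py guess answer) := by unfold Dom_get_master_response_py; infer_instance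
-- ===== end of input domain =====

-- B replaces A's mutable letter-count dict, greedy decrementing pass and while-loop padding by a
-- closed-form count: close letters = multiset intersection of the mismatched guess letters with the
-- mismatched answer letters (sum of min of the two counts per distinct letter); return value only.

-- ===== PORT A =====
-- letter_count built by the if-in/else loop of A
def gmrA_count (al : List Char) : PySem.Dict Char Int :=
  al.foldl (fun d letter =>
    if d.contains letter then d.modify letter 0 (· + 1) else d.insert letter 1)
    PySem.Dict.empty

-- first loop of A: state = (response, letter_count); guess[index] via pyGetD (in range under Pre_)
def gmrA_step1 (gl al : List Char) (s : List Char × PySem.Dict Char Int) (index : Int) :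
    List Char × PySem.Dict Char Int :=
  if PySem.List.pyGetD gl index ' ' = PySem.List.pyGetD al index ' ' then
    (s.1 ++ ['O'], s.2.modify (PySem.List.pyGetD gl index ' ') 0 (· - 1))
  else s

-- second loop of A
def gmrA_step2 (gl al : List Char) (s : List Char × PySem.Dict Char Int) (index : Int) :
    List Char × PySem.Dict Char Int :=
  if PySem.List.pyGetD gl index ' ' ≠ PySem.List.pyGetD al index ' ' then
    if s.2.contains (PySem.List.pyGetD gl index ' ') then
      if s.2.getD (PySem.List.pyGetD gl index ' ') 0 > 0 then
        (s.1 ++ ['+'], s.2.modify (PySem.List.pyGetD gl index ' ') 0 (· - 1))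
      else s
    else s
  else s

-- the `while len(response) < len(answer): response += WRONG` loop of A
def gmrA_pad (resp : List Char) (n : Nat) : List Char :=
  if resp.length < n then gmrA_pad (resp ++ ['.']) n else resp
termination_by n - resp.length
decreasing_by simp_all; omega

def get_master_response_py (guess : String) (answer : String) : String :=
  if guess = answer then String.ofList (answer.toList.map (fun _ => 'O'))
  else
    String.ofList (gmrA_pad
      ((PySem.List.pyRange 0 answer.toList.length 1).foldl
        (gmrA_step2 guess.toList answer.toList)
        ((PySem.List.pyRange 0 answer.toList.length 1).foldl
          (gmrA_step1 guess.toList answer.toList) ([], gmrA_count answer.toList))).1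
      answer.toList.length)

-- ===== PORT B =====
-- pairs = [(guess[index], answer[index]) for index in range(len(answer))]
def gmrB_pairs (gl al : List Char) : List (Char × Char) :=
  (PySem.List.pyRange 0 al.length 1).map
    (fun index => (PySem.List.pyGetD gl index ' ', PySem.List.pyGetD al index ' '))

def gmrB_misses (gl al : List Char) : List (Char × Char) :=
  (gmrB_pairs gl al).filter (fun p => p.1 != p.2)

-- num_close = sum(min(mis_guess.count(c), mis_answer.count(c)) for c in set(mis_guess))
def gmrB_close (gl al : List Char) : Nat :=
  (PySem.Set.ofList ((gmrB_misses gl al).map Prod.fst)).foldl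
    (fun acc c => acc + min (((gmrB_misses gl al).map Prod.fst).count c)
                            (((gmrB_misses gl al).map Prod.snd).count c)) 0

def get_master_response_py_alt (guess : String) (answer : String) : String :=
  String.ofList
    (List.replicate ((gmrB_pairs guess.toList answer.toList).length
        - (gmrB_misses guess.toList answer.toList).length) 'O' ++
     List.replicate (gmrB_close guess.toList answer.toList) '+' ++
     List.replicate ((gmrB_misses guess.toList answer.toList).length
        - gmrB_close guess.toList answer.toList) '.')

-- ===== PRECONDITION & SPEC =====
-- Pre_ excludes exactly the inputs on which the Python A raises IndexError (guess shorter than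
-- the answer and not equal to it); B raises the same IndexError there.
def Pre_get_master_response_py (guess : String) (answer : String) : Prop :=
  answer.toList.length ≤ guess.toList.length
instance (guess : String) (answer : String) : Decidable (Pre_get_master_response_py guess answer) := by
  unfold Pre_get_master_response_py; infer_instance

def pvWitness_get_master_response_py : String × String := ("crane", "crate")

def Spec_get_master_response_py (guess : String) (answer : String) (out : String) : Prop := out = get_master_response_py_alt guess answer
instance (guess : String) (answer : String) (out : String) : Decidable (Spec_get_master_response_py guess answer out) := by unfold Spec_get_master_response_py; infer_instance

-- ===== CLAIM (what is proved, stated in full; the proofs are below) =====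
def Claim_equal_get_master_response_py : Prop := ∀ (guess : String) (answer : String), Dom_get_master_response_py guess answer → Pre_get_master_response_py guess answer → Spec_get_master_response_py guess answer (get_master_response_py guess answer)

-- ===== LEMMAS AND PROOFS =====

-- A's loop bodies re-expressed over the (guess letter, answer letter) pair at each index
def gmrStepP1 (s : List Char × PySem.Dict Char Int) (p : Char × Char) :
    List Char × PySem.Dict Char Int :=
  if p.1 = p.2 then (s.1 ++ ['O'], s.2.modify p.1 0 (· - 1)) else s

def gmrStepP2 (s : List Char × PySem.Dict Char Int) (p : Char × Char) :
    List Char × PySem.Dict Char Int :=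
  if p.1 ≠ p.2 ∧ s.2.getD p.1 0 > 0 then (s.1 ++ ['+'], s.2.modify p.1 0 (· - 1)) else s

-- A's greedy close-matching over the mismatched guess letters
def gmrGreedy : List Char → PySem.Dict Char Int → Nat
  | [], _ => 0
  | c :: l, d =>
      if d.getD c 0 > 0 then gmrGreedy l (d.modify c 0 (· - 1)) + 1 else gmrGreedy l d

-- A's counter-building loop body is `modify … 0 (· + 1)`
lemma gmrA_count_step (d : PySem.Dict Char Int) (x : Char) :
    (if d.contains x then d.modify x 0 (· + 1) else d.insert x 1) = d.modify x 0 (· + 1) := by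
  by_cases h : d.contains x = true
  · simp [h]
  · simp only [Bool.not_eq_true] at h
    simp [h, PySem.Dict.modify, PySem.Dict.insert, PySem.Dict.getD_of_not_contains d 0 h]

lemma gmrA_count_eq_counter (al : List Char) : gmrA_count al = PySem.Dict.counter al := by
  rw [PySem.Dict.counter_eq_foldl]
  unfold gmrA_count
  congr 1
  funext d x
  exact gmrA_count_step d x

-- index loop = pair loop
lemma gmr_fold_pairs1 (gl al : List Char) (s : List Char × PySem.Dict Char Int) :
    (PySem.List.pyRange 0 al.length 1).foldl (gmrA_step1 gl al) s
      = (gmrB_pairs gl al).foldl gmrStepP1 s := by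
  unfold gmrB_pairs
  rw [List.foldl_map]
  rfl

-- A's second-loop inner `letter in letter_count` test is subsumed by `> 0`
lemma gmr_fold_pairs2 (gl al : List Char) (s : List Char × PySem.Dict Char Int) :
    (PySem.List.pyRange 0 al.length 1).foldl (gmrA_step2 gl al) s
      = (gmrB_pairs gl al).foldl gmrStepP2 s := by
  unfold gmrB_pairs
  rw [List.foldl_map]
  apply PySem.List.foldl_congr_mem
  intro s i _
  unfold gmrA_step2 gmrStepP2
  by_cases h1 : PySem.List.pyGetD gl i ' ' = PySem.List.pyGetD al i ' '
  · rw [if_neg (by simp [h1]), if_neg (by simp [h1])]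
  · rw [if_pos h1]
    by_cases h2 : s.2.getD (PySem.List.pyGetD gl i ' ') 0 > 0
    · have hc : s.2.contains (PySem.List.pyGetD gl i ' ') = true := by
        by_contra hc
        simp only [Bool.not_eq_true] at hc
        rw [PySem.Dict.getD_of_not_contains s.2 0 hc] at h2
        omega
      rw [if_pos hc, if_pos h2, if_pos ⟨h1, h2⟩]
    · rw [if_neg (show ¬(PySem.List.pyGetD gl i ' ' ≠ PySem.List.pyGetD al i ' ' ∧
          s.2.getD (PySem.List.pyGetD gl i ' ') 0 > 0) from fun h => h2 h.2)]
      by_cases hc : s.2.contains (PySem.List.pyGetD gl i ' ') = true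
      · rw [if_pos hc, if_neg h2]
      · rw [if_neg hc]

-- first loop: appends one 'O' per exact pair and decrements the matched letters
lemma gmr_loop1 (L : List (Char × Char)) (resp : List Char) (d : PySem.Dict Char Int) :
    L.foldl gmrStepP1 (resp, d)
      = (resp ++ List.replicate (L.countP (fun p => p.1 == p.2)) 'O',
         ((L.filter (fun p => p.1 == p.2)).map Prod.fst).foldl
           (fun d c => d.modify c 0 (· - 1)) d) := by
  induction L generalizing resp d with
  | nil => simp
  | cons p L ih =>
      rw [List.foldl_cons]
      by_cases h : p.1 = p.2
      · rw [show gmrStepP1 (resp, d) p = (resp ++ ['O'], d.modify p.1 0 (· - 1)) from by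
          simp [gmrStepP1, h], ih]
        simp [h, List.replicate_succ]
      · rw [show gmrStepP1 (resp, d) p = (resp, d) from by simp [gmrStepP1, h], ih]
        simp [h]

-- a chain of decrements subtracts the count
lemma gmr_getD_foldl_sub (l : List Char) (d : PySem.Dict Char Int) (c : Char) :
    (l.foldl (fun d x => d.modify x 0 (· - 1)) d).getD c 0 = d.getD c 0 - l.count c := by
  induction l generalizing d with
  | nil => simp
  | cons x l ih =>
      rw [List.foldl_cons, ih, PySem.Dict.getD_modify, List.count_cons]
      by_cases h : c = x
      · simp [h]; omega
      · have h2 : ¬ x = c := fun he => h he.symm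
        simp [h, h2]

-- exact pairs contribute nothing to the second loop
lemma gmr_loop2_filter (L : List (Char × Char)) (s : List Char × PySem.Dict Char Int) :
    L.foldl gmrStepP2 s = (L.filter (fun p => p.1 != p.2)).foldl gmrStepP2 s := by
  induction L generalizing s with
  | nil => rfl
  | cons p L ih =>
      rw [List.foldl_cons, List.filter_cons]
      by_cases h : p.1 = p.2
      · have : gmrStepP2 s p = s := by unfold gmrStepP2; rw [if_neg (by simp [h])]
        simp [h, this, ih]
      · simp [h, ih]

-- on mismatched pairs the second loop is A's greedy count over the guess letters
lemma gmr_loop2_greedy (M : List (Char × Char)) (hM : ∀ p ∈ M, ¬ p.1 = p.2)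
    (resp : List Char) (d : PySem.Dict Char Int) :
    (M.foldl gmrStepP2 (resp, d)).1
      = resp ++ List.replicate (gmrGreedy (M.map Prod.fst) d) '+' := by
  induction M generalizing resp d with
  | nil => simp [gmrGreedy]
  | cons p M ih =>
      have hp : ¬ p.1 = p.2 := hM p (by simp)
      rw [List.foldl_cons]
      simp only [List.map_cons]
      by_cases h : d.getD p.1 0 > 0
      · rw [show gmrStepP2 (resp, d) p = (resp ++ ['+'], d.modify p.1 0 (· - 1)) from by
          simp [gmrStepP2, hp, h]]
        rw [ih (fun q hq => hM q (by simp [hq]))]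
        rw [gmrGreedy, if_pos h]
        simp [List.replicate_succ, List.append_assoc]
      · rw [show gmrStepP2 (resp, d) p = (resp, d) from by
          unfold gmrStepP2; rw [if_neg (fun hc => h hc.2)]]
        rw [ih (fun q hq => hM q (by simp [hq]))]
        rw [gmrGreedy, if_neg h]

-- KEY: the greedy count is the multiset-intersection closed form
lemma gmrGreedy_eq_sum (l : List Char) (d : PySem.Dict Char Int) :
    gmrGreedy l d = ∑ c ∈ l.toFinset, min (l.count c) (d.getD c 0).toNat := by
  induction l generalizing d with
  | nil => simp [gmrGreedy]
  | cons c l ih =>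
      rw [List.toFinset_cons]
      by_cases h : d.getD c 0 > 0
      · rw [gmrGreedy, if_pos h, ih]
        by_cases hc : c ∈ l.toFinset
        · rw [Finset.insert_eq_self.2 hc]
          rw [← Finset.add_sum_erase _ _ hc, ← Finset.add_sum_erase _ _ hc]
          have hterm : ∀ x ∈ l.toFinset.erase c,
              min (l.count x) (((d.modify c 0 (· - 1)).getD x 0).toNat)
                = min ((c :: l).count x) ((d.getD x 0).toNat) := by
            intro x hx
            have hxc : ¬ x = c := (Finset.mem_erase.1 hx).1
            have hb : (c == x) = false := by simpa using fun he : c = x => hxc he.symm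
            rw [PySem.Dict.getD_modify, if_neg hxc, List.count_cons, hb]
            simp
          rw [Finset.sum_congr rfl hterm]
          have : min (l.count c) (((d.modify c 0 (· - 1)).getD c 0).toNat) + 1
              = min ((c :: l).count c) ((d.getD c 0).toNat) := by
            rw [PySem.Dict.getD_modify, if_pos rfl, List.count_cons]
            simp only [BEq.rfl, if_true]
            omega
          omega
        · rw [Finset.sum_insert hc]
          have hcount : l.count c = 0 := by
            simpa using (List.count_eq_zero.2 (fun hmem => hc (List.mem_toFinset.2 hmem)))
          have hterm : ∀ x ∈ l.toFinset,
              min (l.count x) (((d.modify c 0 (· - 1)).getD x 0).toNat)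
                = min ((c :: l).count x) ((d.getD x 0).toNat) := by
            intro x hx
            have hxc : ¬ x = c := fun he => hc (he ▸ hx)
            have hb : (c == x) = false := by simpa using fun he : c = x => hxc he.symm
            rw [PySem.Dict.getD_modify, if_neg hxc, List.count_cons, hb]
            simp
          rw [Finset.sum_congr rfl hterm]
          rw [List.count_cons, hcount]
          simp only [BEq.rfl, if_true]
          omega
      · rw [gmrGreedy, if_neg h, ih]
        have hd0 : (d.getD c 0).toNat = 0 := by omega
        by_cases hc : c ∈ l.toFinset
        · rw [Finset.insert_eq_self.2 hc]
          apply Finset.sum_congr rfl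
          intro x hx
          by_cases hxc : x = c
          · subst hxc; rw [hd0]; simp
          · have hb : (c == x) = false := by simpa using fun he : c = x => hxc he.symm
            rw [List.count_cons, hb]; simp
        · rw [Finset.sum_insert hc]
          rw [List.count_cons, hd0]
          simp only [Nat.min_zero, Nat.zero_add]
          apply Finset.sum_congr rfl
          intro x hx
          have hxc : ¬ x = c := fun he => hc (he ▸ hx)
          have hb : (c == x) = false := by simpa using fun he : c = x => hxc he.symm
          rw [List.count_cons, hb]
          simp

-- B's sum over set(mis_guess) is the same Finset sum
lemma gmr_foldl_add_eq_sum (S : List Char) (hS : S.Nodup) (f : Char → Nat) :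
    S.foldl (fun acc c => acc + f c) 0 = ∑ c ∈ S.toFinset, f c := by
  rw [List.sum_toFinset f hS, ← List.foldl_map, ← List.sum_eq_foldl]

lemma gmr_toFinset_ofList (l : List Char) : (PySem.Set.ofList l).toFinset = l.toFinset := by
  apply Finset.ext
  intro x
  simp [List.mem_toFinset, PySem.Set.mem_ofList]

-- the pairs' answer components are exactly the answer
lemma gmr_map_snd_pairs (gl al : List Char) : (gmrB_pairs gl al).map Prod.snd = al := by
  unfold gmrB_pairs
  rw [List.map_map]
  exact PySem.List.map_pyGetD_pyRange_zero' al ' '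

-- counts split along the exact/mismatch partition
lemma gmr_count_split (L : List (Char × Char)) (f : Char × Char → Char) (c : Char) :
    ((L.filter (fun p => p.1 == p.2)).map f).count c
      + ((L.filter (fun p => p.1 != p.2)).map f).count c = (L.map f).count c := by
  induction L with
  | nil => simp
  | cons p L ih =>
      simp only [bne] at ih
      by_cases h : p.1 = p.2
      · have hb : (p.1 == p.2) = true := by simpa using h
        simp only [List.filter_cons, List.map_cons, hb, bne, Bool.not_true, if_true,
          Bool.false_eq_true, if_false, List.count_cons]
        omega
      · have hb : (p.1 == p.2) = false := by simpa using h
        simp only [List.filter_cons, List.map_cons, hb, bne, Bool.not_false, if_true,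
          Bool.false_eq_true, if_false, List.count_cons]
        omega

-- on exact pairs the guess letter IS the answer letter
lemma gmr_map_fst_filter_eq (L : List (Char × Char)) :
    (L.filter (fun p => p.1 == p.2)).map Prod.fst
      = (L.filter (fun p => p.1 == p.2)).map Prod.snd := by
  apply List.map_congr_left
  intro p hp
  have := (List.mem_filter.1 hp).2
  simpa using this

-- the while-padding loop appends WRONG up to length n
lemma gmrA_pad_eq (resp : List Char) (n : Nat) :
    gmrA_pad resp n = resp ++ List.replicate (n - resp.length) '.' := by
  by_cases h : resp.length < n
  · rw [gmrA_pad, if_pos h, gmrA_pad_eq (resp ++ ['.']) n]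
    have hn : n - resp.length = (n - (resp.length + 1)) + 1 := by omega
    simp [hn, List.replicate_succ, List.append_assoc]
  · rw [gmrA_pad, if_neg h]
    have hn : n - resp.length = 0 := by omega
    simp [hn]
termination_by n - resp.length
decreasing_by simp_all; omega

-- exact count + mismatch count = number of pairs
lemma gmr_countP_split (L : List (Char × Char)) :
    L.countP (fun p => p.1 == p.2) + (L.filter (fun p => p.1 != p.2)).length = L.length := by
  induction L with
  | nil => simp
  | cons p L ih =>
      simp only [bne] at ih
      by_cases h : p.1 = p.2
      · have hb : (p.1 == p.2) = true := by simpa using h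
        simp only [List.countP_cons, List.filter_cons, hb, bne, Bool.not_true, if_true,
          Bool.false_eq_true, if_false, List.length_cons]
        omega
      · have hb : (p.1 == p.2) = false := by simpa using h
        simp only [List.countP_cons, List.filter_cons, hb, bne, Bool.not_false, if_true,
          Bool.false_eq_true, if_false, List.length_cons]
        omega

-- ===== VERDICT (by name: the statement is the Claim_ definition above) =====
theorem get_master_response_py_spec : Claim_equal_get_master_response_py := by
  intro guess answer _ _
  unfold Spec_get_master_response_py
  unfold get_master_response_py get_master_response_py_alt gmrB_close gmrB_misses
  by_cases heq : guess = answer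
  · subst heq
    rw [if_pos rfl]
    have hmis : (gmrB_pairs guess.toList guess.toList).filter (fun p => p.1 != p.2) = [] := by
      apply List.filter_eq_nil_iff.2
      intro p hp
      unfold gmrB_pairs at hp
      obtain ⟨i, _, rfl⟩ := List.mem_map.1 hp
      simp
    have hlen : (gmrB_pairs guess.toList guess.toList).length = guess.toList.length := by
      unfold gmrB_pairs
      rw [List.length_map, PySem.List.length_pyRange_one]
      omega
    simp only [hmis, List.map_nil, List.length_nil, Nat.sub_zero, hlen]
    simp [PySem.Set.ofList, List.map_const']
  · rw [if_neg heq]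
    rw [gmr_fold_pairs1, gmr_fold_pairs2, gmrA_count_eq_counter]
    set L := gmrB_pairs guess.toList answer.toList with hL
    set n := answer.toList.length with hn
    rw [gmr_loop1, gmr_loop2_filter, gmr_loop2_greedy _
      (fun p hp => by simpa using ((List.mem_filter.1 hp).2))]
    set R := L.countP (fun p => p.1 == p.2) with hR
    set mis := L.filter (fun p => p.1 != p.2) with hmis
    set mg := mis.map Prod.fst with hmg
    set ma := mis.map Prod.snd with hma
    set d1 := ((L.filter (fun p => p.1 == p.2)).map Prod.fst).foldl
      (fun d c => d.modify c 0 (· - 1)) (PySem.Dict.counter answer.toList) with hd1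
    -- d1 holds exactly the mismatched answer letters' counts
    have hd1c : ∀ c, (d1.getD c 0).toNat = ma.count c := by
      intro c
      rw [hd1, gmr_getD_foldl_sub, PySem.Dict.getD_counter]
      rw [gmr_map_fst_filter_eq]
      have hsum := gmr_count_split L Prod.snd c
      rw [gmr_map_snd_pairs] at hsum
      rw [hma, hmis]
      omega
    have hgreedy : gmrGreedy mg d1 = ∑ c ∈ mg.toFinset, min (mg.count c) (ma.count c) := by
      rw [gmrGreedy_eq_sum]
      exact Finset.sum_congr rfl (fun c _ => by rw [hd1c c])
    set C := ∑ c ∈ mg.toFinset, min (mg.count c) (ma.count c) with hC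
    have hclose : (PySem.Set.ofList mg).foldl
        (fun acc c => acc + min (mg.count c) (ma.count c)) 0 = C := by
      rw [gmr_foldl_add_eq_sum _ (PySem.Set.nodup_ofList mg), gmr_toFinset_ofList]
    have hLlen : L.length = n := by
      rw [hL, hn]
      unfold gmrB_pairs
      rw [List.length_map, PySem.List.length_pyRange_one]
      omega
    have hsplit : R + mis.length = n := by
      rw [hR, hmis, ← hLlen]
      exact gmr_countP_split L
    rw [hgreedy, gmrA_pad_eq, hclose]
    have hlen2 : ([] ++ List.replicate R 'O' ++ List.replicate C '+').length = R + C := by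
      simp
    rw [hlen2]
    have h1 : L.length - mis.length = R := by omega
    have h2 : n - (R + C) = mis.length - C := by omega
    rw [h1, h2]
    simp [List.append_assoc]
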